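-- pv_equiv track=rewrite | github.com/timpark0807/self-taught-swe | Algorithms/Leetcode/68 - Text Justification.py | get_lines_and_remain
-- ===== SOURCE A (Python) =====
-- def get_lines_and_remain(words, maxWidth):
--     lines = [[]]
--     line_index = 0
--     remain = {}
--     curr_remain = maxWidth
--
--     for word in words:
--         if len(word) <= curr_remain:
--             lines[line_index].append(word)
--             curr_remain -= (len(word) + 1)
--         else:
--             remain[line_index] = curr_remain + (len(lines[line_index]))
--             curr_remain = maxWidth - (len(word) + 1)
--             lines.append([word])
--             line_index += 1
--
--     return lines, remain
-- ===== SOURCE B (Python) =====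
-- def get_lines_and_remain(words, maxWidth):
--     # Greedy grouping tracking the characters already placed on the current line,
--     # then tabulate remain in closed form: maxWidth minus the line's total characters.
--     lines = [[]]
--     width = 0  # total characters on the current (last) line
--     for w in words:
--         if width + len(lines[-1]) + len(w) <= maxWidth:
--             lines[-1].append(w)
--             width += len(w)
--         else:
--             lines.append([w])
--             width = len(w)
--     remain = {i: maxWidth - sum(map(len, line)) for i, line in enumerate(lines[:-1])}
--     return lines, remain
-- ===== Notes on version B (the rewrite author's own statement) =====
-- stated objective: simpler
-- what changed: A threads a fused remaining-space accumulator and records remain[line] incrementally at each overflow; B tracks only the characters placed on the current line during the greedy grouping and afterwards tabulates remain for every line but the last in closed form as maxWidth minus the line's total characters.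
import Mathlib
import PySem

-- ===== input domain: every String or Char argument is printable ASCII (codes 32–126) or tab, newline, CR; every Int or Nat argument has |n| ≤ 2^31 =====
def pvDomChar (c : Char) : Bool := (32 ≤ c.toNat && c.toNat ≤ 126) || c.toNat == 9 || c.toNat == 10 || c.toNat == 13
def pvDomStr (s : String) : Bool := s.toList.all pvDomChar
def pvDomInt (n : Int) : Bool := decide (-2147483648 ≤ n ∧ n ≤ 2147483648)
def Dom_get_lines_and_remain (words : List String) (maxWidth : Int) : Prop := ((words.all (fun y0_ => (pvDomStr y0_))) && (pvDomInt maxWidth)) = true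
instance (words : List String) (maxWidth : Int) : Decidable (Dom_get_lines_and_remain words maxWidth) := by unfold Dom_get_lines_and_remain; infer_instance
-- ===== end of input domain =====

-- B replaces A's fused remaining-space accumulator by a width accumulator plus a
-- closed-form tabulation of remain (maxWidth minus the line's characters) after grouping.

-- ===== PORT A =====
-- loop body of A; state = (lines, line_index, remain, curr_remain)
def pvStepA (maxWidth : Int)
    (st : List (List String) × Nat × PySem.Dict Int Int × Int) (word : String) :
    List (List String) × Nat × PySem.Dict Int Int × Int :=
  let lines := st.1
  let line_index := st.2.1
  let remain := st.2.2.1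
  let curr_remain := st.2.2.2
  if PySem.Str.len word ≤ curr_remain then
    (lines.set line_index (lines.getD line_index [] ++ [word]), line_index,
     remain, curr_remain - (PySem.Str.len word + 1))
  else
    (lines ++ [[word]], line_index + 1,
     remain.insert (line_index : Int)
       (curr_remain + ((lines.getD line_index []).length : Int)),
     maxWidth - (PySem.Str.len word + 1))

def get_lines_and_remain (words : List String) (maxWidth : Int) :
    List (List String) × (List (Int × Int)) :=
  let st := words.foldl (pvStepA maxWidth) ([[]], 0, PySem.Dict.empty, maxWidth)
  (st.1, st.2.2.1.items)

-- ===== PORT B =====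
-- loop body of B; state = (lines, width) where width = chars on the current line
def pvStepB (maxWidth : Int) (st : List (List String) × Int) (w : String) :
    List (List String) × Int :=
  let lines := st.1
  let width := st.2
  if width + ((lines.getLastD []).length : Int) + PySem.Str.len w ≤ maxWidth then
    (lines.dropLast ++ [lines.getLastD [] ++ [w]], width + PySem.Str.len w)
  else
    (lines ++ [[w]], PySem.Str.len w)

-- the dict comprehension {i: maxWidth - sum(map(len, line)) for i, line in enumerate(...)}:
-- keys 0,1,2,… are pairwise distinct, so the dict's items are exactly this map
def pvRemainTab (maxWidth : Int) (L : List (List String)) : List (Int × Int) :=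
  (PySem.List.enumerate L).map (fun p => (p.1, maxWidth - (p.2.map PySem.Str.len).sum))

def get_lines_and_remain_alt (words : List String) (maxWidth : Int) :
    List (List String) × (List (Int × Int)) :=
  let st := words.foldl (pvStepB maxWidth) ([[]], 0)
  -- lines[:-1] = dropLast (exact for every list)
  (st.1, pvRemainTab maxWidth st.1.dropLast)

-- ===== PRECONDITION & SPEC =====
def Spec_get_lines_and_remain (words : List String) (maxWidth : Int) (out : List (List String) × (List (Int × Int))) : Prop := out = get_lines_and_remain_alt words maxWidth
instance (words : List String) (maxWidth : Int) (out : List (List String) × (List (Int × Int))) : Decidable (Spec_get_lines_and_remain words maxWidth out) := by unfold Spec_get_lines_and_remain; infer_instance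

-- ===== CLAIM (what is proved, stated in full; the proofs are below) =====
def Claim_equal_get_lines_and_remain : Prop := ∀ (words : List String) (maxWidth : Int), Dom_get_lines_and_remain words maxWidth → Spec_get_lines_and_remain words maxWidth (get_lines_and_remain words maxWidth)

-- ===== LEMMAS AND PROOFS =====

-- chars on the last line
def pvW (lines : List (List String)) : Int := ((lines.getLastD []).map PySem.Str.len).sum

lemma pv_getLastD_concat {α : Type} (l : List α) (x d : α) :
    (l ++ [x]).getLastD d = x := by
  simp

lemma pv_set_last {α : Type} (l : List α) (h : l ≠ []) (x : α) :
    l.set (l.length - 1) x = l.dropLast ++ [x] := by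
  induction l with
  | nil => simp at h
  | cons a t ih =>
    cases t with
    | nil => simp
    | cons b u =>
      simp only [List.length_cons, Nat.add_sub_cancel, List.set_cons_succ,
        List.dropLast_cons₂, List.cons_append]
      have := ih (by simp)
      simpa using this

lemma pv_getD_last {α : Type} [Inhabited α] (l : List α) (h : l ≠ []) (d : α) :
    l.getD (l.length - 1) d = l.getLastD d := by
  induction l with
  | nil => simp at h
  | cons a t ih =>
    cases t with
    | nil => simp [List.getD]
    | cons b u =>
      have := ih (by simp)
      simpa [List.getD] using this

lemma pv_dropLast_concat_getLastD {α : Type} (l : List α) (h : l ≠ []) (d : α) :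
    l.dropLast ++ [l.getLastD d] = l := by
  induction l with
  | nil => simp at h
  | cons a t ih =>
    cases t with
    | nil => simp
    | cons b u => simpa using ih (by simp)

lemma pv_tab_keys_lt (maxWidth : Int) (L : List (List String)) (k : Int × Int)
    (hk : k ∈ pvRemainTab maxWidth L) : k.1 < (L.length : Int) := by
  unfold pvRemainTab at hk
  simp only [List.mem_map] at hk
  obtain ⟨p, hp, rfl⟩ := hk
  rw [PySem.List.mem_enumerate_iff] at hp
  obtain ⟨j, hj, rfl⟩ := hp
  simp
  omega

lemma pv_not_contains (maxWidth : Int) (L : List (List String)) (remain : PySem.Dict Int Int)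
    (hr : remain.items = pvRemainTab maxWidth L) :
    remain.contains ((L.length : Nat) : Int) = false := by
  by_contra h
  have hc : remain.contains ((L.length : Nat) : Int) = true := by
    cases hcc : remain.contains ((L.length : Nat) : Int) <;> simp_all
  rw [PySem.Dict.contains_iff_mem_keys] at hc
  have : ((L.length : Int)) ∈ remain.items.map (·.1) := by
    simpa [PySem.Dict.keys] using hc
  rw [hr] at this
  simp only [List.mem_map] at this
  obtain ⟨p, hp, hp1⟩ := this
  have := pv_tab_keys_lt maxWidth L p hp
  omega

-- main loop invariant: from linked start states, the two folds stay linked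
lemma pv_loop (maxWidth : Int) (ws : List String) :
    ∀ (lines : List (List String)) (remain : PySem.Dict Int Int),
    lines ≠ [] →
    remain.items = pvRemainTab maxWidth lines.dropLast →
    (ws.foldl (pvStepA maxWidth)
        (lines, lines.length - 1, remain,
         maxWidth - pvW lines - ((lines.getLastD []).length : Int))).1
      = (ws.foldl (pvStepB maxWidth) (lines, pvW lines)).1 ∧
    (ws.foldl (pvStepA maxWidth)
        (lines, lines.length - 1, remain,
         maxWidth - pvW lines - ((lines.getLastD []).length : Int))).2.2.1.items
      = pvRemainTab maxWidth (ws.foldl (pvStepB maxWidth) (lines, pvW lines)).1.dropLast := by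
  induction ws with
  | nil => intro lines remain hne hr; exact ⟨rfl, hr⟩
  | cons w t ih =>
    intro lines remain hne hr
    simp only [List.foldl_cons]
    by_cases hc : pvW lines + ((lines.getLastD []).length : Int) + PySem.Str.len w ≤ maxWidth
    · -- both take the "fits" branch
      have hA : pvStepA maxWidth
          (lines, lines.length - 1, remain,
           maxWidth - pvW lines - ((lines.getLastD []).length : Int)) w
          = (lines.dropLast ++ [lines.getLastD [] ++ [w]], lines.length - 1, remain,
             maxWidth - pvW lines - ((lines.getLastD []).length : Int)
               - (PySem.Str.len w + 1)) := by
        unfold pvStepA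
        simp only
        rw [if_pos (by omega)]
        rw [pv_set_last lines hne, pv_getD_last lines hne]
      have hB : pvStepB maxWidth (lines, pvW lines) w
          = (lines.dropLast ++ [lines.getLastD [] ++ [w]], pvW lines + PySem.Str.len w) := by
        unfold pvStepB
        simp only
        rw [if_pos (by omega)]
      rw [hA, hB]
      set L' := lines.dropLast ++ [lines.getLastD [] ++ [w]] with hL'
      have hne' : L' ≠ [] := by simp [hL']
      have hlast' : L'.getLastD [] = lines.getLastD [] ++ [w] := by
        rw [hL', pv_getLastD_concat]
      have hdrop' : L'.dropLast = lines.dropLast := by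
        simp [hL']
      have hlen' : L'.length = lines.length := by
        have := pv_dropLast_concat_getLastD lines hne ([] : List String)
        calc L'.length = lines.dropLast.length + 1 := by simp [hL']
        _ = (lines.dropLast ++ [lines.getLastD []]).length := by simp
        _ = lines.length := by rw [this]
      have hW' : pvW L' = pvW lines + PySem.Str.len w := by
        unfold pvW
        rw [hlast']
        simp
      have := ih L' remain hne' (by rw [hdrop']; exact hr)
      rw [hW', hlen'] at this
      have harith : maxWidth - pvW lines - ((lines.getLastD []).length : Int)
            - (PySem.Str.len w + 1)
          = maxWidth - (pvW lines + PySem.Str.len w) - ((L'.getLastD []).length : Int) := by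
        rw [hlast']; simp; omega
      rw [harith]
      exact this
    · -- both take the "overflow" branch
      have hA : pvStepA maxWidth
          (lines, lines.length - 1, remain,
           maxWidth - pvW lines - ((lines.getLastD []).length : Int)) w
          = (lines ++ [[w]], lines.length - 1 + 1,
             remain.insert ((lines.length - 1 : Nat) : Int)
               (maxWidth - pvW lines - ((lines.getLastD []).length : Int)
                 + ((lines.getD (lines.length - 1) []).length : Int)),
             maxWidth - (PySem.Str.len w + 1)) := by
        unfold pvStepA
        simp only
        rw [if_neg (by omega)]
      have hB : pvStepB maxWidth (lines, pvW lines) w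
          = (lines ++ [[w]], PySem.Str.len w) := by
        unfold pvStepB
        simp only
        rw [if_neg (by omega)]
      rw [hA, hB]
      set L' := lines ++ [[w]] with hL'
      have hne' : L' ≠ [] := by simp [hL']
      have hlen' : L'.length = lines.length + 1 := by simp [hL']
      have hlenpos : 0 < lines.length := List.length_pos_of_ne_nil hne
      have hlast' : L'.getLastD [] = [w] := by rw [hL', pv_getLastD_concat]
      have hdrop' : L'.dropLast = lines := by simp [hL']
      have hW' : pvW L' = PySem.Str.len w := by
        unfold pvW
        rw [hlast']
        simp
      -- the inserted value is maxWidth - total chars of the finished line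
      have hval : maxWidth - pvW lines - ((lines.getLastD []).length : Int)
            + ((lines.getD (lines.length - 1) []).length : Int)
          = maxWidth - pvW lines := by
        rw [pv_getD_last lines hne]; omega
      -- freshness of the key lines.length - 1 = lines.dropLast.length
      have hdl : lines.dropLast.length = lines.length - 1 := by simp
      have hfresh : remain.contains ((lines.length - 1 : Nat) : Int) = false := by
        have := pv_not_contains maxWidth lines.dropLast remain hr
        rwa [hdl] at this
      set remain' := remain.insert ((lines.length - 1 : Nat) : Int)
          (maxWidth - pvW lines - ((lines.getLastD []).length : Int)
            + ((lines.getD (lines.length - 1) []).length : Int)) with hrm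
      have hr' : remain'.items = pvRemainTab maxWidth L'.dropLast := by
        rw [hrm, PySem.Dict.items_insert_of_not_contains _ _ hfresh, hr, hval, hdrop']
        -- pvRemainTab lines = pvRemainTab lines.dropLast ++ [(len-1, maxWidth - pvW lines)]
        conv_rhs => rw [← pv_dropLast_concat_getLastD lines hne ([] : List String)]
        unfold pvRemainTab
        rw [PySem.List.enumerate_append, List.map_append]
        simp [pvW, hdl]
      have := ih L' remain' hne' hr'
      rw [hW', hlen'] at this
      have hidx : lines.length - 1 + 1 = lines.length + 1 - 1 := by omega
      have harith : maxWidth - (PySem.Str.len w + 1)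
          = maxWidth - PySem.Str.len w - ((L'.getLastD []).length : Int) := by
        rw [hlast']; simp; omega
      rw [hidx, harith]
      exact this

-- ===== VERDICT (by name: the statement is the Claim_ definition above) =====
theorem get_lines_and_remain_spec : Claim_equal_get_lines_and_remain := by
  intro words maxWidth _
  unfold Spec_get_lines_and_remain get_lines_and_remain get_lines_and_remain_alt
  have h := pv_loop maxWidth words [[]] PySem.Dict.empty (by simp)
    (by simp [pvRemainTab, PySem.Dict.empty])
  norm_num [pvW] at h
  exact Prod.ext h.1 h.2
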